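-- pv_equiv track=rewrite | github.com/jramaswami/Advent-Of-Code-2016 | 22/A/python/grid_computing.py | count_viable_pairs
-- ===== SOURCE A (Python) =====
-- USED = 0
--
-- AVAIL = 1
--
-- def get_neighbors(row_index, col_index, grid):
--     """
--     Returns a list of neighbors for the given position.
--     """
--     neighbors = []
--     # up
--     if row_index > 0:
--         neighbors.append(grid[row_index - 1][col_index])
--     # down
--     if row_index < len(grid) - 1:
--         neighbors.append(grid[row_index + 1][col_index])
--     # left
--     if col_index > 0:
--         neighbors.append(grid[row_index][col_index - 1])
--     # right
--     if col_index < len(grid[0]) - 1: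
--         neighbors.append(grid[row_index][col_index + 1])
--
--     return neighbors
--
-- def count_viable_pairs(grid):
--     """
--     Returns a count of the viable pairs in the grid.
--     """
--     count = 0
--     for row_index, row in enumerate(grid):
--         for col_index, storage_data in enumerate(row):
--             if storage_data[USED] > 0:
--                 for neighbor in get_neighbors(row_index, col_index, grid):
--                     if storage_data[USED] <= neighbor[AVAIL]:
--                         count += 1
--
--     return count
-- ===== SOURCE B (Python) =====
-- def count_viable_pairs(grid):
--     """
--     Returns a count of the viable pairs in the grid.
--     Visits each horizontal/vertical adjacency once (right and down
--     neighbors only) and counts both directions of the edge.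
--     """
--     count = 0
--     for r, row in enumerate(grid):
--         for c, x in enumerate(row):
--             if c + 1 < len(row):
--                 y = row[c + 1]
--                 if x[0] > 0 and x[0] <= y[1]:
--                     count += 1
--                 if y[0] > 0 and y[0] <= x[1]:
--                     count += 1
--             if r + 1 < len(grid):
--                 y = grid[r + 1][c]
--                 if x[0] > 0 and x[0] <= y[1]:
--                     count += 1
--                 if y[0] > 0 and y[0] <= x[1]:
--                     count += 1
--     return count
-- ===== Notes on version B (the rewrite author's own statement) =====
-- stated objective: alternative
-- what changed: Instead of expanding each cell's four neighbors via a get_neighbors helper and testing the cell against each, B visits every horizontal/vertical adjacency exactly once (right and down neighbor only) and counts both directions of that edge, eliminating the neighbor-list construction.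
-- outside the precondition, e.g. on count_viable_pairs([[(1, 5), (0, 9)], [(0, 5)]]): A returns 2, B raises IndexError; on count_viable_pairs([[(0, 0)], [(0, 0), (0, 0)]]): A returns 0, B returns 0
import Mathlib
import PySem

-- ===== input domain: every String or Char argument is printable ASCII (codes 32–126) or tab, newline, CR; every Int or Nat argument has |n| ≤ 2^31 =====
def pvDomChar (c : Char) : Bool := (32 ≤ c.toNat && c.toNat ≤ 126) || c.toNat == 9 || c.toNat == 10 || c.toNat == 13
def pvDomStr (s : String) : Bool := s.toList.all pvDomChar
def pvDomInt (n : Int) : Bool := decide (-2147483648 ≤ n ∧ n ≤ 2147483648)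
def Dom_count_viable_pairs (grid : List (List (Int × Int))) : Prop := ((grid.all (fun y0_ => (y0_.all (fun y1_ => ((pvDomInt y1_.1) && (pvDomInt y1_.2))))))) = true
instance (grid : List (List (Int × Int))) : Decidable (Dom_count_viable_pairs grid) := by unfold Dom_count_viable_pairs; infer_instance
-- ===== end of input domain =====

-- B visits each horizontal/vertical adjacency once (right and down neighbors only) and counts
-- both directions of the edge, instead of expanding all four neighbors of every cell via a helper.

-- ===== PORT A =====
-- grid[i][j]: Python raises IndexError off a ragged edge; PySem.List.pyGet? is none there and
-- `.getD (0, 0)` / `.getD []` stands in — exactly those grids are excluded by Pre_ below.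
def get_neighbors (row_index col_index : Int) (grid : List (List (Int × Int))) : List (Int × Int) :=
  let neighbors : List (Int × Int) := []
  -- up
  let neighbors := if row_index > 0 then
      neighbors ++ [(PySem.List.pyGet? ((PySem.List.pyGet? grid (row_index - 1)).getD []) col_index).getD (0, 0)] else neighbors
  -- down
  let neighbors := if row_index < PySem.List.len grid - 1 then
      neighbors ++ [(PySem.List.pyGet? ((PySem.List.pyGet? grid (row_index + 1)).getD []) col_index).getD (0, 0)] else neighbors
  -- left
  let neighbors := if col_index > 0 then
      neighbors ++ [(PySem.List.pyGet? ((PySem.List.pyGet? grid row_index).getD []) (col_index - 1)).getD (0, 0)] else neighbors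
  -- right
  let neighbors := if col_index < PySem.List.len ((PySem.List.pyGet? grid 0).getD []) - 1 then
      neighbors ++ [(PySem.List.pyGet? ((PySem.List.pyGet? grid row_index).getD []) (col_index + 1)).getD (0, 0)] else neighbors
  neighbors

def count_viable_pairs (grid : List (List (Int × Int))) : Int :=
  (PySem.List.enumerate grid).foldl (fun count p =>
    (PySem.List.enumerate p.2).foldl (fun count q =>
      if q.2.1 > 0 then
        (get_neighbors p.1 q.1 grid).foldl
          (fun count n => if q.2.1 ≤ n.2 then count + 1 else count) count
      else count) count) 0

-- ===== PORT B =====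
def count_viable_pairs_alt (grid : List (List (Int × Int))) : Int :=
  (PySem.List.enumerate grid).foldl (fun count p =>
    (PySem.List.enumerate p.2).foldl (fun count q =>
      let count := if q.1 + 1 < PySem.List.len p.2 then
          let y := (PySem.List.pyGet? p.2 (q.1 + 1)).getD (0, 0)
          let count := if q.2.1 > 0 ∧ q.2.1 ≤ y.2 then count + 1 else count
          if y.1 > 0 ∧ y.1 ≤ q.2.2 then count + 1 else count
        else count
      if p.1 + 1 < PySem.List.len grid then
        let y := (PySem.List.pyGet? ((PySem.List.pyGet? grid (p.1 + 1)).getD []) q.1).getD (0, 0)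
        let count := if q.2.1 > 0 ∧ q.2.1 ≤ y.2 then count + 1 else count
        if y.1 > 0 ∧ y.1 ≤ q.2.2 then count + 1 else count
      else count) count) 0

-- ===== PRECONDITION & SPEC =====
-- Pre_ excludes ragged grids (rows of unequal length): there A's neighbor indexing can raise
-- IndexError, and where it happens to return, the value hinges on A accidentally using row 0's
-- length as every row's right boundary; B raises IndexError on some of those grids itself.
def Pre_count_viable_pairs (grid : List (List (Int × Int))) : Prop :=
  ∀ row ∈ grid, row.length = (grid.headD []).length
instance (grid : List (List (Int × Int))) : Decidable (Pre_count_viable_pairs grid) := by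
  unfold Pre_count_viable_pairs; infer_instance
def pvWitness_count_viable_pairs : (List (List (Int × Int))) :=
  [[(1, 5), (2, 3)], [(0, 1), (4, 9)]]
def Spec_count_viable_pairs (grid : List (List (Int × Int))) (out : Int) : Prop := out = count_viable_pairs_alt grid
instance (grid : List (List (Int × Int))) (out : Int) : Decidable (Spec_count_viable_pairs grid out) := by unfold Spec_count_viable_pairs; infer_instance

-- ===== CLAIM (what is proved, stated in full; the proofs are below) =====
def Claim_equal_count_viable_pairs : Prop := ∀ (grid : List (List (Int × Int))), Dom_count_viable_pairs grid → Pre_count_viable_pairs grid → Spec_count_viable_pairs grid (count_viable_pairs grid)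

-- ===== LEMMAS AND PROOFS =====

-- viability of the ordered pair (x, y): x is non-empty and fits into y's available space
def pvV (x y : Int × Int) : Int := if 0 < x.1 ∧ x.1 ≤ y.2 then 1 else 0

-- cell accessor (total, junk default; the sums below only use in-range indices)
def pvX (grid : List (List (Int × Int))) (r c : Nat) : Int × Int :=
  (grid.getD r []).getD c (0, 0)

-- per-cell contribution of A: the four gated neighbor directions
def pvACell (X : Nat → Nat → Int × Int) (R C r c : Nat) : Int :=
  (if 0 < r then pvV (X r c) (X (r - 1) c) else 0) +
  (if r + 1 < R then pvV (X r c) (X (r + 1) c) else 0) +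
  (if 0 < c then pvV (X r c) (X r (c - 1)) else 0) +
  (if c + 1 < C then pvV (X r c) (X r (c + 1)) else 0)

-- per-cell contribution of B: both directions of the right and down edges
def pvBCell (X : Nat → Nat → Int × Int) (R C r c : Nat) : Int :=
  (if c + 1 < C then pvV (X r c) (X r (c + 1)) + pvV (X r (c + 1)) (X r c) else 0) +
  (if r + 1 < R then pvV (X r c) (X (r + 1) c) + pvV (X (r + 1) c) (X r c) else 0)

lemma pv_pyGetD_nat {α : Type} (l : List α) (d : α) (i : Nat) :
    (PySem.List.pyGet? l (i : Int)).getD d = l.getD i d := by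
  simp [PySem.List.pyGet?_natCast, List.getD_eq_getElem?_getD]

lemma pv_headD_getD (grid : List (List (Int × Int))) : grid.getD 0 [] = grid.headD [] := by
  cases grid <;> simp

lemma pv_sum_enumerate {α : Type} (f : Int → α → Int) (d : α) (l : List α) : ∀ s : Int,
    ((PySem.List.enumerate l s).map (fun p => f p.1 p.2)).sum
      = ∑ k ∈ Finset.range l.length, f (s + (k : Int)) (l.getD k d) := by
  induction l with
  | nil => intro s; simp [PySem.List.enumerate_nil]
  | cons x xs ih =>
    intro s
    rw [PySem.List.enumerate_cons, List.map_cons, List.sum_cons, ih (s + 1),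
      List.length_cons, Finset.sum_range_succ', add_comm]
    congr 1
    · apply Finset.sum_congr rfl
      intro k _
      have hcast : s + (((k : Nat) + 1 : Nat) : Int) = s + 1 + (k : Int) := by push_cast; ring
      rw [List.getD_cons_succ, hcast]
    · simp

lemma pv_shift_sum (n : Nat) (t : Nat → Int) :
    (∑ r ∈ Finset.range n, if 0 < r then t r else 0)
      = ∑ r ∈ Finset.range n, if r + 1 < n then t (r + 1) else 0 := by
  cases n with
  | zero => simp
  | succ m =>
    rw [Finset.sum_range_succ', Finset.sum_range_succ]
    have h0 : (if (0 : Nat) < 0 then t 0 else 0) = 0 := by simp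
    have hm : (if m + 1 < m + 1 then t (m + 1) else 0) = 0 := by simp
    rw [h0, hm, add_zero, add_zero]
    apply Finset.sum_congr rfl
    intro i hi
    have hi' := Finset.mem_range.mp hi
    rw [if_pos (by omega : 0 < i + 1), if_pos (by omega : i + 1 < m + 1)]

lemma pv_sum_ite_const (P : Prop) [Decidable P] (s : Finset ℕ) (f : ℕ → Int) :
    (∑ c ∈ s, if P then f c else 0) = if P then ∑ c ∈ s, f c else 0 := by
  split <;> simp

lemma pv_ite_add (P : Prop) [Decidable P] (a b : Int) :
    (if P then a + b else 0) = (if P then a else 0) + (if P then b else 0) := by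
  split <;> simp

lemma pv_step (f : (Int × Int) → Int) (L : List (Int × Int)) (P : Prop) [Decidable P]
    (Q : Prop) [Decidable Q] (n m : Int × Int) (hPQ : P ↔ Q) (hval : Q → f n = f m) :
    ((if P then L ++ [n] else L).map f).sum = (L.map f).sum + (if Q then f m else 0) := by
  by_cases h : Q
  · rw [if_pos (hPQ.mpr h), if_pos h, List.map_append, List.sum_append]
    simp [hval h]
  · rw [if_neg (fun hp => h (hPQ.mp hp)), if_neg h, add_zero]

lemma pv_cells_eq (X : Nat → Nat → Int × Int) (R C : Nat) :
    (∑ r ∈ Finset.range R, ∑ c ∈ Finset.range C, pvACell X R C r c)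
      = ∑ r ∈ Finset.range R, ∑ c ∈ Finset.range C, pvBCell X R C r c := by
  unfold pvACell pvBCell
  simp only [pv_ite_add, Finset.sum_add_distrib]
  have hU : (∑ r ∈ Finset.range R, ∑ c ∈ Finset.range C,
        if 0 < r then pvV (X r c) (X (r - 1) c) else 0)
      = ∑ r ∈ Finset.range R, ∑ c ∈ Finset.range C,
        if r + 1 < R then pvV (X (r + 1) c) (X r c) else 0 := by
    calc (∑ r ∈ Finset.range R, ∑ c ∈ Finset.range C,
            if 0 < r then pvV (X r c) (X (r - 1) c) else 0)
        = ∑ r ∈ Finset.range R,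
            if 0 < r then ∑ c ∈ Finset.range C, pvV (X r c) (X (r - 1) c) else 0 :=
          Finset.sum_congr rfl (fun r _ => pv_sum_ite_const _ _ _)
      _ = ∑ r ∈ Finset.range R,
            if r + 1 < R then ∑ c ∈ Finset.range C, pvV (X (r + 1) c) (X (r + 1 - 1) c) else 0 :=
          pv_shift_sum R (fun r => ∑ c ∈ Finset.range C, pvV (X r c) (X (r - 1) c))
      _ = ∑ r ∈ Finset.range R, ∑ c ∈ Finset.range C,
            if r + 1 < R then pvV (X (r + 1) c) (X r c) else 0 := by
          apply Finset.sum_congr rfl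
          intro r _
          rw [pv_sum_ite_const]
          simp
  have hL : (∑ r ∈ Finset.range R, ∑ c ∈ Finset.range C,
        if 0 < c then pvV (X r c) (X r (c - 1)) else 0)
      = ∑ r ∈ Finset.range R, ∑ c ∈ Finset.range C,
        if c + 1 < C then pvV (X r (c + 1)) (X r c) else 0 := by
    apply Finset.sum_congr rfl
    intro r _
    calc (∑ c ∈ Finset.range C, if 0 < c then pvV (X r c) (X r (c - 1)) else 0)
        = ∑ c ∈ Finset.range C, if c + 1 < C then pvV (X r (c + 1)) (X r (c + 1 - 1)) else 0 :=
          pv_shift_sum C (fun c => pvV (X r c) (X r (c - 1)))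
      _ = ∑ c ∈ Finset.range C, if c + 1 < C then pvV (X r (c + 1)) (X r c) else 0 := by
          apply Finset.sum_congr rfl
          intro c _
          simp
  rw [hU, hL]
  ring

lemma pv_gate_count (x : Int × Int) (ns : List (Int × Int)) :
    (if x.1 > 0 then ((ns.countP (fun n => decide (x.1 ≤ n.2))) : Int) else 0)
      = (ns.map (pvV x)).sum := by
  induction ns with
  | nil => simp
  | cons n ns ih =>
    rw [List.map_cons, List.sum_cons, ← ih]
    by_cases hx : x.1 > 0
    · by_cases h2 : x.1 ≤ n.2 <;> simp [pvV, hx, h2, Int.add_comm]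
    · simp [pvV, hx]

lemma pvA_eq_sum (grid : List (List (Int × Int))) :
    count_viable_pairs grid
      = ((PySem.List.enumerate grid).map (fun p =>
          ((PySem.List.enumerate p.2).map (fun q =>
            if q.2.1 > 0 then ((get_neighbors p.1 q.1 grid).countP (fun n => decide (q.2.1 ≤ n.2)) : Int)
            else 0)).sum)).sum := by
  unfold count_viable_pairs
  have hinner : ∀ p ∈ PySem.List.enumerate grid, ∀ acc : Int,
      (PySem.List.enumerate p.2).foldl (fun count q =>
        if q.2.1 > 0 then
          (get_neighbors p.1 q.1 grid).foldl
            (fun count n => if q.2.1 ≤ n.2 then count + 1 else count) count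
        else count) acc
        = acc + ((PySem.List.enumerate p.2).map (fun q =>
            if q.2.1 > 0 then ((get_neighbors p.1 q.1 grid).countP (fun n => decide (q.2.1 ≤ n.2)) : Int)
            else 0)).sum := by
    intro p _ acc
    have hcell : ∀ q ∈ PySem.List.enumerate p.2, ∀ count : Int,
        (if q.2.1 > 0 then
          (get_neighbors p.1 q.1 grid).foldl
            (fun count n => if q.2.1 ≤ n.2 then count + 1 else count) count
        else count)
          = count + (if q.2.1 > 0 then
              ((get_neighbors p.1 q.1 grid).countP (fun n => decide (q.2.1 ≤ n.2)) : Int) else 0) := by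
      intro q _ count
      by_cases h : q.2.1 > 0
      · simp only [if_pos h, PySem.List.foldl_ite_add_one]
      · simp [h]
    rw [PySem.List.foldl_congr_mem' _ _ _ _ hcell, PySem.List.foldl_add]
  rw [PySem.List.foldl_congr_mem' _ _ _ _ hinner, PySem.List.foldl_add, zero_add]

lemma pvB_eq_sum (grid : List (List (Int × Int))) :
    count_viable_pairs_alt grid
      = ((PySem.List.enumerate grid).map (fun p =>
          ((PySem.List.enumerate p.2).map (fun q =>
            (if q.1 + 1 < PySem.List.len p.2 then
              pvV q.2 ((PySem.List.pyGet? p.2 (q.1 + 1)).getD (0, 0)) +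
              pvV ((PySem.List.pyGet? p.2 (q.1 + 1)).getD (0, 0)) q.2
             else 0) +
            (if p.1 + 1 < PySem.List.len grid then
              pvV q.2 ((PySem.List.pyGet? ((PySem.List.pyGet? grid (p.1 + 1)).getD []) q.1).getD (0, 0)) +
              pvV ((PySem.List.pyGet? ((PySem.List.pyGet? grid (p.1 + 1)).getD []) q.1).getD (0, 0)) q.2
             else 0))).sum)).sum := by
  unfold count_viable_pairs_alt
  have hinner : ∀ p ∈ PySem.List.enumerate grid, ∀ acc : Int,
      (PySem.List.enumerate p.2).foldl (fun count q =>
        let count := if q.1 + 1 < PySem.List.len p.2 then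
            let y := (PySem.List.pyGet? p.2 (q.1 + 1)).getD (0, 0)
            let count := if q.2.1 > 0 ∧ q.2.1 ≤ y.2 then count + 1 else count
            if y.1 > 0 ∧ y.1 ≤ q.2.2 then count + 1 else count
          else count
        if p.1 + 1 < PySem.List.len grid then
          let y := (PySem.List.pyGet? ((PySem.List.pyGet? grid (p.1 + 1)).getD []) q.1).getD (0, 0)
          let count := if q.2.1 > 0 ∧ q.2.1 ≤ y.2 then count + 1 else count
          if y.1 > 0 ∧ y.1 ≤ q.2.2 then count + 1 else count
        else count) acc
        = acc + ((PySem.List.enumerate p.2).map (fun q =>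
            (if q.1 + 1 < PySem.List.len p.2 then
              pvV q.2 ((PySem.List.pyGet? p.2 (q.1 + 1)).getD (0, 0)) +
              pvV ((PySem.List.pyGet? p.2 (q.1 + 1)).getD (0, 0)) q.2
             else 0) +
            (if p.1 + 1 < PySem.List.len grid then
              pvV q.2 ((PySem.List.pyGet? ((PySem.List.pyGet? grid (p.1 + 1)).getD []) q.1).getD (0, 0)) +
              pvV ((PySem.List.pyGet? ((PySem.List.pyGet? grid (p.1 + 1)).getD []) q.1).getD (0, 0)) q.2
             else 0))).sum := by
    intro p _ acc
    have hcell : ∀ q ∈ PySem.List.enumerate p.2, ∀ count : Int,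
        (let count := if q.1 + 1 < PySem.List.len p.2 then
            let y := (PySem.List.pyGet? p.2 (q.1 + 1)).getD (0, 0)
            let count := if q.2.1 > 0 ∧ q.2.1 ≤ y.2 then count + 1 else count
            if y.1 > 0 ∧ y.1 ≤ q.2.2 then count + 1 else count
          else count
        if p.1 + 1 < PySem.List.len grid then
          let y := (PySem.List.pyGet? ((PySem.List.pyGet? grid (p.1 + 1)).getD []) q.1).getD (0, 0)
          let count := if q.2.1 > 0 ∧ q.2.1 ≤ y.2 then count + 1 else count
          if y.1 > 0 ∧ y.1 ≤ q.2.2 then count + 1 else count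
        else count)
          = count + ((if q.1 + 1 < PySem.List.len p.2 then
              pvV q.2 ((PySem.List.pyGet? p.2 (q.1 + 1)).getD (0, 0)) +
              pvV ((PySem.List.pyGet? p.2 (q.1 + 1)).getD (0, 0)) q.2
             else 0) +
            (if p.1 + 1 < PySem.List.len grid then
              pvV q.2 ((PySem.List.pyGet? ((PySem.List.pyGet? grid (p.1 + 1)).getD []) q.1).getD (0, 0)) +
              pvV ((PySem.List.pyGet? ((PySem.List.pyGet? grid (p.1 + 1)).getD []) q.1).getD (0, 0)) q.2
             else 0)) := by
      intro q _ count
      simp only [pvV]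
      split_ifs <;> omega
    rw [PySem.List.foldl_congr_mem' _ _ _ _ hcell, PySem.List.foldl_add]
  rw [PySem.List.foldl_congr_mem' _ _ _ _ hinner, PySem.List.foldl_add, zero_add]

lemma pv_row_len (grid : List (List (Int × Int))) (hpre : Pre_count_viable_pairs grid)
    (r : Nat) (hr : r < grid.length) :
    (grid.getD r []).length = (grid.headD []).length := by
  apply hpre
  rw [List.getD_eq_getElem grid [] hr]
  exact List.getElem_mem hr

lemma pvA_term (grid : List (List (Int × Int))) (r c : Nat) :
    (if (pvX grid r c).1 > 0 then
      ((get_neighbors (r : Int) (c : Int) grid).countP (fun n => decide ((pvX grid r c).1 ≤ n.2)) : Int)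
     else 0)
      = pvACell (pvX grid) grid.length (grid.headD []).length r c := by
  rw [pv_gate_count]
  have hhead : (grid[0]?).getD [] = grid.headD [] := by
    rw [← pv_headD_getD, List.getD_eq_getElem?_getD]
  have e1 : ((c : Int) + 1) = ((c + 1 : Nat) : Int) := by push_cast; ring
  have e2 : ((r : Int) + 1) = ((r + 1 : Nat) : Int) := by push_cast; ring
  simp only [get_neighbors, PySem.List.len_eq, PySem.List.pyGet?_zero, e1, e2,
    pv_pyGetD_nat, hhead]
  have hval1 : 0 < r → pvV (pvX grid r c)
      (((PySem.List.pyGet? grid ((r : Int) - 1)).getD []).getD c (0, 0))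
        = pvV (pvX grid r c) (pvX grid (r - 1) c) := by
    intro h
    congr 1
    rw [show ((r : Int) - 1) = ((r - 1 : Nat) : Int) by omega, pv_pyGetD_nat]
    rfl
  have hval3 : 0 < c → pvV (pvX grid r c)
      ((PySem.List.pyGet? (grid.getD r []) ((c : Int) - 1)).getD (0, 0))
        = pvV (pvX grid r c) (pvX grid r (c - 1)) := by
    intro h
    congr 1
    rw [show ((c : Int) - 1) = ((c - 1 : Nat) : Int) by omega, pv_pyGetD_nat]
    rfl
  rw [pv_step _ _ _ _ _ _
      (show ((c : Int) < ((grid.headD []).length : Int) - 1) ↔ (c + 1 < (grid.headD []).length) by omega)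
      (fun _ => rfl),
    pv_step _ _ _ _ _ _
      (show ((c : Int) > 0) ↔ (0 < c) by omega) hval3,
    pv_step _ _ _ _ _ _
      (show ((r : Int) < (grid.length : Int) - 1) ↔ (r + 1 < grid.length) by omega)
      (fun _ => rfl),
    pv_step _ _ _ _ _ _
      (show ((r : Int) > 0) ↔ (0 < r) by omega) hval1]
  unfold pvACell
  simp only [List.map_nil, List.sum_nil, zero_add]
  rfl

lemma pvA_sum_cells (grid : List (List (Int × Int))) (hpre : Pre_count_viable_pairs grid) :
    count_viable_pairs grid
      = ∑ r ∈ Finset.range grid.length, ∑ c ∈ Finset.range (grid.headD []).length,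
          pvACell (pvX grid) grid.length (grid.headD []).length r c := by
  rw [pvA_eq_sum,
    pv_sum_enumerate (fun i row => ((PySem.List.enumerate row).map (fun q =>
      if q.2.1 > 0 then ((get_neighbors i q.1 grid).countP (fun n => decide (q.2.1 ≤ n.2)) : Int)
      else 0)).sum) [] grid 0]
  apply Finset.sum_congr rfl
  intro r hr
  have hr' := Finset.mem_range.mp hr
  rw [zero_add,
    pv_sum_enumerate (fun j x =>
      if x.1 > 0 then ((get_neighbors (r : Int) j grid).countP (fun n => decide (x.1 ≤ n.2)) : Int)
      else 0) ((0, 0) : Int × Int) (grid.getD r []) 0,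
    pv_row_len grid hpre r hr']
  apply Finset.sum_congr rfl
  intro c hc
  rw [zero_add, ← pvA_term grid r c]
  rfl

lemma pvB_term (grid : List (List (Int × Int))) (hpre : Pre_count_viable_pairs grid)
    (r c : Nat) (hr : r < grid.length) :
    ((if (c : Int) + 1 < PySem.List.len (grid.getD r []) then
        pvV (pvX grid r c) ((PySem.List.pyGet? (grid.getD r []) ((c : Int) + 1)).getD (0, 0)) +
        pvV ((PySem.List.pyGet? (grid.getD r []) ((c : Int) + 1)).getD (0, 0)) (pvX grid r c)
      else 0) +
     (if (r : Int) + 1 < PySem.List.len grid then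
        pvV (pvX grid r c) ((PySem.List.pyGet? ((PySem.List.pyGet? grid ((r : Int) + 1)).getD []) (c : Int)).getD (0, 0)) +
        pvV ((PySem.List.pyGet? ((PySem.List.pyGet? grid ((r : Int) + 1)).getD []) (c : Int)).getD (0, 0)) (pvX grid r c)
      else 0))
      = pvBCell (pvX grid) grid.length (grid.headD []).length r c := by
  have hrow := pv_row_len grid hpre r hr
  have e1 : ((c : Int) + 1) = ((c + 1 : Nat) : Int) := by push_cast; ring
  have e2 : ((r : Int) + 1) = ((r + 1 : Nat) : Int) := by push_cast; ring
  simp only [PySem.List.len_eq, e1, e2, pv_pyGetD_nat, hrow, Nat.cast_lt]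
  unfold pvBCell pvX
  rfl

lemma pvB_sum_cells (grid : List (List (Int × Int))) (hpre : Pre_count_viable_pairs grid) :
    count_viable_pairs_alt grid
      = ∑ r ∈ Finset.range grid.length, ∑ c ∈ Finset.range (grid.headD []).length,
          pvBCell (pvX grid) grid.length (grid.headD []).length r c := by
  rw [pvB_eq_sum,
    pv_sum_enumerate (fun i row => ((PySem.List.enumerate row).map (fun q =>
      (if q.1 + 1 < PySem.List.len row then
        pvV q.2 ((PySem.List.pyGet? row (q.1 + 1)).getD (0, 0)) +
        pvV ((PySem.List.pyGet? row (q.1 + 1)).getD (0, 0)) q.2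
       else 0) +
      (if i + 1 < PySem.List.len grid then
        pvV q.2 ((PySem.List.pyGet? ((PySem.List.pyGet? grid (i + 1)).getD []) q.1).getD (0, 0)) +
        pvV ((PySem.List.pyGet? ((PySem.List.pyGet? grid (i + 1)).getD []) q.1).getD (0, 0)) q.2
       else 0))).sum) [] grid 0]
  apply Finset.sum_congr rfl
  intro r hr
  have hr' := Finset.mem_range.mp hr
  rw [zero_add,
    pv_sum_enumerate (fun j x =>
      (if j + 1 < PySem.List.len (grid.getD r []) then
        pvV x ((PySem.List.pyGet? (grid.getD r []) (j + 1)).getD (0, 0)) +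
        pvV ((PySem.List.pyGet? (grid.getD r []) (j + 1)).getD (0, 0)) x
       else 0) +
      (if (r : Int) + 1 < PySem.List.len grid then
        pvV x ((PySem.List.pyGet? ((PySem.List.pyGet? grid ((r : Int) + 1)).getD []) j).getD (0, 0)) +
        pvV ((PySem.List.pyGet? ((PySem.List.pyGet? grid ((r : Int) + 1)).getD []) j).getD (0, 0)) x
       else 0)) ((0, 0) : Int × Int) (grid.getD r []) 0,
    pv_row_len grid hpre r hr']
  apply Finset.sum_congr rfl
  intro c hc
  rw [zero_add, ← pvB_term grid hpre r c hr']
  rfl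

-- ===== VERDICT (by name: the statement is the Claim_ definition above) =====

theorem count_viable_pairs_spec : Claim_equal_count_viable_pairs := by
  intro grid _ hpre
  unfold Spec_count_viable_pairs
  rw [pvA_sum_cells grid hpre, pvB_sum_cells grid hpre, pv_cells_eq]
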